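-- pv_equiv track=rewrite | github.com/yongu2000/algorithm | 프로그래머스/2/42586. 기능개발/기능개발.py | solution
-- ===== SOURCE A (Python) =====
-- from collections import deque
-- import math
--
-- def solution(progresses, speeds):
--     answer = []
--     progresses = deque(progresses)
--     speeds = deque(speeds)
--     while progresses:
--         job = 0
--         day = math.ceil((100 - progresses[0]) / speeds[0])
--
--         for i in range(len(progresses)):
--             progresses[i] += speeds[i] * day
--
--         while progresses and progresses[0] >= 100:
--             progresses.popleft()
--             speeds.popleft()
--             job += 1
--         answer.append(job)
--     return answer
-- ===== SOURCE B (Python) =====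
-- def solution(progresses, speeds):
--     # Days each feature needs: ceil((100 - p) / s), computed exactly in integers.
--     days = [-((p - 100) // s) for p, s in zip(progresses, speeds)]
--     answer = []
--     cur = 0
--     for d in days:
--         if answer and d <= cur:
--             answer[-1] += 1
--         else:
--             answer.append(1)
--             cur = d
--     return answer
-- ===== Notes on version B (the rewrite author's own statement) =====
-- stated objective: alternative
-- what changed: A repeatedly simulates the deployment on a deque, each round rescanning and updating every remaining progress and popping the finished prefix; B computes each feature's finish day once with exact integer ceiling division and groups the days in a single linear pass.
-- outside the precondition, e.g. on solution([50], [-1]): A returns [1], B returns [1]; on solution([2147483546, 81], [2, 2147483598]): A returns [1, 0, 1], B returns [1, 1]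
import Mathlib
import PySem

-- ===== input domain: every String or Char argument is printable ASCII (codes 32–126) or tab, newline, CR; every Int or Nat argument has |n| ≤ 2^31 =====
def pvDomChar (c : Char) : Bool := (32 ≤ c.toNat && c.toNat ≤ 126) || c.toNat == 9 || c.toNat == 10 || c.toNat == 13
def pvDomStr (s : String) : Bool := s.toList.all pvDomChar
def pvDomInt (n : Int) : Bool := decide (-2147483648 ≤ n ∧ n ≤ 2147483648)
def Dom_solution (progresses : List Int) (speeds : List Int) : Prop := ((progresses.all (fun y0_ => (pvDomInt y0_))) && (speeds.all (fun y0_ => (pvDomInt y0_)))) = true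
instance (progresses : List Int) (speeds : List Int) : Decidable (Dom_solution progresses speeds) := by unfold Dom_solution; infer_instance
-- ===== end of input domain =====

-- B computes each feature's finish day once with exact integer ceiling division and
-- groups them in a single pass, instead of A's deque simulation that rescans and
-- updates every remaining feature each round.


-- ===== PORT A =====
-- math.ceil((100 - p) / s) = exact integer ceiling -((-a) // s) on every input Pre_ admits
-- (Pre_'s size bound is exactly the regime where CPython's float quotient cannot misround).
def ceilA (a b : Int) : Int := -(PySem.Int.floordiv (-a) b)

-- inner `while progresses and progresses[0] >= 100: popleft both, job += 1`
-- (Python raises IndexError if speeds runs out first; such inputs are outside Pre_)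
def popA : List Int → List Int → Int → Int × List Int × List Int
  | p :: ps, s :: ss, job =>
      if 100 ≤ p then popA ps ss (job + 1) else (job, p :: ps, s :: ss)
  | ps, ss, job => (job, ps, ss)

-- the outer `while progresses:` loop; fuel = initial length suffices on Pre_ (each
-- iteration pops at least the head).  `zipWith` mirrors `for i in range(len(progresses))`
-- (Python raises IndexError when speeds is shorter; outside Pre_).
def loopA : Nat → List Int → List Int → List Int → List Int
  | 0, ans, _, _ => ans
  | _ + 1, ans, [], _ => ans
  | fuel + 1, ans, p :: ps, ss =>
      let day := ceilA (100 - p) (ss.headD 0)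
      let ps' := List.zipWith (fun pi si => pi + si * day) (p :: ps) ss
      let r := popA ps' ss 0
      loopA fuel (ans ++ [r.1]) r.2.1 r.2.2

def solution (progresses : List Int) (speeds : List Int) : List Int :=
  loopA progresses.length [] progresses speeds

-- ===== PORT B =====
-- days = [-((p - 100) // s) for p, s in zip(progresses, speeds)]
def daysB (progresses speeds : List Int) : List Int :=
  List.zipWith (fun p s => -(PySem.Int.floordiv (p - 100) s)) progresses speeds

-- one step of B's grouping loop; the answer list is kept reversed (append / increment
-- of the last entry become cons / increment of the head), state = (reversed answer, cur)
def stepB (st : List Int × Int) (d : Int) : List Int × Int :=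
  match st with
  | ([], _) => ([1], d)
  | (c :: rest, cur) => if d ≤ cur then ((c + 1) :: rest, cur) else (1 :: c :: rest, d)

def solution_alt (progresses : List Int) (speeds : List Int) : List Int :=
  ((daysB progresses speeds).foldl stepB ([], 0)).1.reverse

-- ===== PRECONDITION & SPEC =====
-- Pre_ excludes: (a) speeds shorter than progresses (A raises IndexError); (b) a
-- non-positive speed among the used ones (zero: ZeroDivisionError; negative: A loops
-- forever except in the accidental case where each such head's speed exactly divides its
-- remaining work — those accidental returns are excluded too, see cites); (c) pairs with
-- (s+1)*|100-p| > 2^52, where math.ceil applied to CPython's FLOAT quotient can misround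
-- on A's huge intermediate progress values and return a value off by one group (cite);
-- inside the bound A's float ceiling is provably exact, so the exact-integer port is faithful.
def Pre_solution (progresses : List Int) (speeds : List Int) : Prop :=
  progresses.length ≤ speeds.length ∧
  ∀ s ∈ speeds.take progresses.length, 0 < s ∧
    ∀ p ∈ progresses, (s + 1) * |100 - p| ≤ 4503599627370496

instance (progresses : List Int) (speeds : List Int) : Decidable (Pre_solution progresses speeds) := by
  unfold Pre_solution; infer_instance

def pvWitness_solution : List Int × List Int := ([93, 30, 55], [1, 30, 5])

def Spec_solution (progresses : List Int) (speeds : List Int) (out : List Int) : Prop :=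
  out = solution_alt progresses speeds
instance (progresses : List Int) (speeds : List Int) (out : List Int) : Decidable (Spec_solution progresses speeds out) := by unfold Spec_solution; infer_instance

-- ===== CLAIM (what is proved, stated in full; the proofs are below) =====
def Claim_equal_solution : Prop := ∀ (progresses : List Int) (speeds : List Int), Dom_solution progresses speeds → Pre_solution progresses speeds → Spec_solution progresses speeds (solution progresses speeds)

-- ===== LEMMAS AND PROOFS =====

-- reference grouping: gr ds = the group sizes, a new group starting at each element
-- larger than the current group's first element
def grAux (cur cnt : Int) : List Int → List Int
  | [] => [cnt]
  | d :: ds => if d ≤ cur then grAux cur (cnt + 1) ds else cnt :: grAux d 1 ds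

def gr : List Int → List Int
  | [] => []
  | d :: ds => grAux d 1 ds

lemma ceilA_bounds (a : Int) {b : Int} (hb : 0 < b) :
    (ceilA a b - 1) * b < a ∧ a ≤ ceilA a b * b :=
  (PySem.Int.neg_floordiv_neg_eq_iff_of_pos hb).mp rfl

lemma ceilA_sub_mul (a k : Int) {b : Int} (hb : 0 < b) :
    ceilA (a - b * k) b = ceilA a b - k := by
  obtain ⟨h1, h2⟩ := ceilA_bounds a hb
  exact (PySem.Int.neg_floordiv_neg_eq_iff_of_pos hb).mpr ⟨by nlinarith, by nlinarith⟩

lemma ceilA_nonpos_iff (a : Int) {b : Int} (hb : 0 < b) : ceilA a b ≤ 0 ↔ a ≤ 0 := by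
  obtain ⟨h1, h2⟩ := ceilA_bounds a hb
  constructor
  · intro h; nlinarith
  · intro h; by_contra hc; rw [not_le] at hc; nlinarith

lemma daysB_head (p s : Int) : -(PySem.Int.floordiv (p - 100) s) = ceilA (100 - p) s := by
  simp [ceilA, neg_sub]

-- updating every progress by s*day shifts every remaining day count down by day
lemma daysB_update (day : Int) :
    ∀ (ps ss : List Int), (∀ s ∈ ss.take ps.length, 0 < s) →
      daysB (List.zipWith (fun pi si => pi + si * day) ps ss) ss
        = (daysB ps ss).map (fun d => d - day) := by
  intro ps
  induction ps with
  | nil => intro ss _; simp [daysB]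
  | cons p ps ih =>
    intro ss hs
    cases ss with
    | nil => simp [daysB]
    | cons s ss =>
      have hs0 : 0 < s := by simpa using hs s (by simp)
      have htail : ∀ t ∈ ss.take ps.length, 0 < t := by
        intro t ht; exact hs t (by simp [List.take_succ_cons]; exact Or.inr ht)
      simp only [List.zipWith_cons_cons, daysB, List.map_cons]
      refine List.cons_eq_cons.mpr ⟨?_, ?_⟩
      · rw [daysB_head (p + s * day) s, daysB_head p s,
          show (100 : Int) - (p + s * day) = (100 - p) - s * day from by ring,
          ceilA_sub_mul _ _ hs0]
      · exact ih ss htail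

-- popA pops exactly the longest prefix with non-positive (updated) day count
lemma popA_spec :
    ∀ (qs ts : List Int) (j : Int), qs.length ≤ ts.length →
      (∀ t ∈ ts.take qs.length, 0 < t) →
      popA qs ts j =
        (j + (((daysB qs ts).takeWhile (fun e => decide (e ≤ 0))).length : Int),
         qs.drop ((daysB qs ts).takeWhile (fun e => decide (e ≤ 0))).length,
         ts.drop ((daysB qs ts).takeWhile (fun e => decide (e ≤ 0))).length) := by
  intro qs
  induction qs with
  | nil => intro ts j _ _; simp [popA, daysB]
  | cons q qs ih =>
    intro ts j hlen hpos
    cases ts with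
    | nil => simp at hlen
    | cons t ts =>
      have ht0 : 0 < t := by simpa using hpos t (by simp)
      have htail : ∀ u ∈ ts.take qs.length, 0 < u := by
        intro u hu; exact hpos u (by simp [List.take_succ_cons]; exact Or.inr hu)
      have hcond : (100 ≤ q) ↔ (-(PySem.Int.floordiv (q - 100) t) ≤ 0) := by
        rw [daysB_head, ceilA_nonpos_iff _ ht0]; omega
      by_cases hq : 100 ≤ q
      · have he : -(PySem.Int.floordiv (q - 100) t) ≤ 0 := hcond.mp hq
        have hd : daysB (q :: qs) (t :: ts)
            = (-(PySem.Int.floordiv (q - 100) t)) :: daysB qs ts := rfl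
        simp only [popA, if_pos hq, hd, List.takeWhile_cons, decide_eq_true he,
          if_pos, List.length_cons, List.drop_succ_cons]
        rw [ih ts (j + 1) (by simpa using hlen) htail]
        refine Prod.ext ?_ rfl
        push_cast; ring
      · have he : ¬ (-(PySem.Int.floordiv (q - 100) t) ≤ 0) := fun h => hq (hcond.mpr h)
        simp [popA, if_neg hq, daysB, he]

lemma grAux_eq (cur cnt : Int) (ds : List Int) :
    grAux cur cnt ds =
      (cnt + ((ds.takeWhile (fun d => decide (d ≤ cur))).length : Int))
        :: gr (ds.dropWhile (fun d => decide (d ≤ cur))) := by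
  induction ds generalizing cnt with
  | nil => simp [grAux, gr]
  | cons d ds ih =>
    by_cases h : d ≤ cur
    · simp only [grAux, if_pos h, List.takeWhile_cons, List.dropWhile_cons,
        decide_eq_true h, if_pos, List.length_cons]
      rw [ih (cnt + 1)]
      refine List.cons_eq_cons.mpr ⟨by push_cast; ring, rfl⟩
    · simp [grAux, gr, h]

lemma grAux_map_sub (c : Int) :
    ∀ (ds : List Int) (cur cnt : Int),
      grAux (cur - c) cnt (ds.map (fun d => d - c)) = grAux cur cnt ds := by
  intro ds
  induction ds with
  | nil => intro cur cnt; simp [grAux]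
  | cons d ds ih =>
    intro cur cnt
    by_cases h : d ≤ cur
    · simp only [List.map_cons, grAux, if_pos h, if_pos (by omega : d - c ≤ cur - c)]
      exact ih cur (cnt + 1)
    · simp only [List.map_cons, grAux, if_neg h,
        if_neg (by omega : ¬ (d - c ≤ cur - c))]
      exact congrArg (cnt :: ·) (ih d 1)

lemma gr_map_sub (c : Int) (ds : List Int) : gr (ds.map (fun d => d - c)) = gr ds := by
  cases ds with
  | nil => simp [gr]
  | cons d ds =>
    simp only [List.map_cons, gr]
    simpa using grAux_map_sub c ds d 1

lemma drop_takeWhile_length (l : List Int) (p : Int → Bool) :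
    l.drop (l.takeWhile p).length = l.dropWhile p := by
  calc l.drop (l.takeWhile p).length
      = ((l.takeWhile p) ++ (l.dropWhile p)).drop (l.takeWhile p).length := by
        rw [List.takeWhile_append_dropWhile]
    _ = l.dropWhile p := List.drop_left

lemma loopA_eq :
    ∀ (fuel : Nat) (ans ps ss : List Int), ps.length ≤ ss.length →
      (∀ s ∈ ss.take ps.length, 0 < s) → ps.length ≤ fuel →
      loopA fuel ans ps ss = ans ++ gr (daysB ps ss) := by
  intro fuel
  induction fuel with
  | zero =>
    intro ans ps ss _ _ hf
    have : ps = [] := List.eq_nil_of_length_eq_zero (by omega)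
    subst this
    simp [loopA, daysB, gr]
  | succ fuel ih =>
    intro ans ps ss hlen hpos hf
    cases ps with
    | nil => simp [loopA, daysB, gr]
    | cons p ps' =>
      cases ss with
      | nil => simp at hlen
      | cons s ss' =>
        have hs0 : 0 < s := hpos s (by simp)
        have hd0 : daysB (p :: ps') (s :: ss')
            = ceilA (100 - p) s :: daysB ps' ss' := by
          simp only [daysB, List.zipWith_cons_cons, daysB_head]
        have hn1 : (daysB (p :: ps') (s :: ss')).length = (p :: ps').length := by
          simp only [daysB, List.length_zipWith]; omega
        have hzl : (List.zipWith (fun pi si => pi + si * ceilA (100 - p) s)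
            (p :: ps') (s :: ss')).length = (p :: ps').length := by
          simp only [List.length_zipWith]; omega
        have hup := daysB_update (ceilA (100 - p) s) (p :: ps') (s :: ss') hpos
        have hpop := popA_spec
          (List.zipWith (fun pi si => pi + si * ceilA (100 - p) s) (p :: ps') (s :: ss'))
          (s :: ss') 0 (by rw [hzl]; exact hlen) (by rw [hzl]; exact hpos)
        rw [hup] at hpop
        have hpredeq : ((fun e => decide (e ≤ 0)) ∘ (fun d => d - ceilA (100 - p) s))
            = (fun d => decide (d ≤ ceilA (100 - p) s)) := by
          funext d; simp
        have htw : ((daysB (p :: ps') (s :: ss')).map (fun d => d - ceilA (100 - p) s)).takeWhile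
              (fun e => decide (e ≤ 0))
            = ((daysB (p :: ps') (s :: ss')).takeWhile
                (fun d => decide (d ≤ ceilA (100 - p) s))).map (fun d => d - ceilA (100 - p) s) := by
          rw [List.takeWhile_map, hpredeq]
        rw [htw, List.length_map] at hpop
        have htwc : (daysB (p :: ps') (s :: ss')).takeWhile
              (fun d => decide (d ≤ ceilA (100 - p) s))
            = ceilA (100 - p) s
                :: (daysB ps' ss').takeWhile (fun d => decide (d ≤ ceilA (100 - p) s)) := by
          rw [hd0, List.takeWhile_cons]; simp
        have hdwc : (daysB (p :: ps') (s :: ss')).dropWhile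
              (fun d => decide (d ≤ ceilA (100 - p) s))
            = (daysB ps' ss').dropWhile (fun d => decide (d ≤ ceilA (100 - p) s)) := by
          rw [hd0, List.dropWhile_cons]; simp
        rw [htwc, List.length_cons] at hpop
        have hLle : (((daysB ps' ss').takeWhile
            (fun d => decide (d ≤ ceilA (100 - p) s))).length + 1) ≤ (p :: ps').length := by
          have := (List.takeWhile_sublist
            (l := daysB (p :: ps') (s :: ss'))
            (fun d => decide (d ≤ ceilA (100 - p) s))).length_le
          rw [htwc, List.length_cons, hn1] at this
          exact this
        simp only [loopA, List.headD_cons]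
        rw [hpop]
        have hlen2 : ((List.zipWith (fun pi si => pi + si * ceilA (100 - p) s)
              (p :: ps') (s :: ss')).drop
                ((((daysB ps' ss').takeWhile (fun d => decide (d ≤ ceilA (100 - p) s))).length + 1))).length
            ≤ ((s :: ss').drop
                ((((daysB ps' ss').takeWhile (fun d => decide (d ≤ ceilA (100 - p) s))).length + 1))).length := by
          simp only [List.length_drop, hzl]; omega
        have hpos2 : ∀ t ∈ ((s :: ss').drop
              ((((daysB ps' ss').takeWhile (fun d => decide (d ≤ ceilA (100 - p) s))).length + 1))).take
              (((List.zipWith (fun pi si => pi + si * ceilA (100 - p) s)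
                (p :: ps') (s :: ss')).drop
                  ((((daysB ps' ss').takeWhile (fun d => decide (d ≤ ceilA (100 - p) s))).length + 1))).length),
            0 < t := by
          intro t ht
          simp only [List.length_drop, hzl] at ht
          rw [← List.drop_take] at ht
          exact hpos t (List.mem_of_mem_drop ht)
        have hf2 : ((List.zipWith (fun pi si => pi + si * ceilA (100 - p) s)
              (p :: ps') (s :: ss')).drop
                ((((daysB ps' ss').takeWhile (fun d => decide (d ≤ ceilA (100 - p) s))).length + 1))).length
            ≤ fuel := by
          simp only [List.length_drop, hzl]
          simp only [List.length_cons] at hf ⊢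
          omega
        rw [ih _ _ _ hlen2 hpos2 hf2]
        have hdrop2 : daysB
            ((List.zipWith (fun pi si => pi + si * ceilA (100 - p) s) (p :: ps') (s :: ss')).drop
              ((((daysB ps' ss').takeWhile (fun d => decide (d ≤ ceilA (100 - p) s))).length + 1)))
            ((s :: ss').drop
              ((((daysB ps' ss').takeWhile (fun d => decide (d ≤ ceilA (100 - p) s))).length + 1)))
            = ((daysB ps' ss').dropWhile
                (fun d => decide (d ≤ ceilA (100 - p) s))).map (fun d => d - ceilA (100 - p) s) := by
          show List.zipWith _ _ _ = _
          rw [← List.drop_zipWith]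
          have h1 : List.zipWith (fun p_1 s_1 => -PySem.Int.floordiv (p_1 - 100) s_1)
              (List.zipWith (fun pi si => pi + si * ceilA (100 - p) s) (p :: ps') (s :: ss'))
              (s :: ss')
              = (daysB (p :: ps') (s :: ss')).map (fun d => d - ceilA (100 - p) s) := hup
          rw [h1, ← List.map_drop]
          have hK : ((daysB ps' ss').takeWhile (fun d => decide (d ≤ ceilA (100 - p) s))).length + 1
              = ((daysB (p :: ps') (s :: ss')).takeWhile
                  (fun d => decide (d ≤ ceilA (100 - p) s))).length := by
            rw [htwc, List.length_cons]
          rw [hK, drop_takeWhile_length, hdwc]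
        rw [hdrop2, gr_map_sub]
        have hgr : gr (daysB (p :: ps') (s :: ss'))
            = ((1 : Int) + ((daysB ps' ss').takeWhile (fun d => decide (d ≤ ceilA (100 - p) s))).length)
              :: gr ((daysB ps' ss').dropWhile (fun d => decide (d ≤ ceilA (100 - p) s))) := by
          rw [hd0]
          show grAux _ 1 _ = _
          rw [grAux_eq]
        rw [hgr]
        simp only [List.append_assoc, List.cons_append, List.nil_append]
        congr 2
        push_cast
        ring

lemma foldB_eq :
    ∀ (ds acc : List Int) (c cur : Int),
      ((ds.foldl stepB (c :: acc, cur)).1).reverse = acc.reverse ++ grAux cur c ds := by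
  intro ds
  induction ds with
  | nil => intro acc c cur; simp [grAux]
  | cons d ds ih =>
    intro acc c cur
    by_cases h : d ≤ cur
    · simp only [List.foldl_cons, stepB, if_pos h, grAux]
      exact ih acc (c + 1) cur
    · simp only [List.foldl_cons, stepB, if_neg h, grAux]
      rw [ih (c :: acc) 1 d]
      simp

lemma solution_alt_eq (ps ss : List Int) : solution_alt ps ss = gr (daysB ps ss) := by
  unfold solution_alt
  cases h : daysB ps ss with
  | nil => simp [gr]
  | cons d ds =>
    simp only [List.foldl_cons, stepB]
    rw [show gr (d :: ds) = grAux d 1 ds from rfl]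
    simpa using foldB_eq ds [] 1 d

-- ===== VERDICT (by name: the statement is the Claim_ definition above) =====
theorem solution_spec : Claim_equal_solution := by
  intro ps ss _hdom hpre
  unfold Spec_solution
  rw [solution_alt_eq]
  unfold solution
  rw [loopA_eq ps.length [] ps ss hpre.1 (fun s hs => (hpre.2 s hs).1) le_rfl]
  simp
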